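-- pv_equiv track=rewrite | github.com/dmjohnsson23/cipher | Cipher/Encryption/Playfair.py | checkKey
-- ===== SOURCE A (Python) =====
-- from string import ascii_lowercase as alphabet
--
-- def checkKey(key, message=""):
--     numMissing=0
--     #key must be 25 letters long
--     if len(key)!=25:
--         return False
--     key=key.lower()
--     #key must contain every letter of the alphabet except one exactly one time
--     for letter in alphabet:
--         if not letter in key:
--             numMissing+=1
--             if numMissing>1:
--                 return False
--     #if everything works out, then the key is good
--     return True
-- ===== SOURCE B (Python) =====
-- def _popcount(n):
--     c = 0
--     while n:
--         c += n & 1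
--         n >>= 1
--     return c
--
-- def checkKey(key, message=""):
--     # key must be 25 letters long, covering the alphabet with at most one letter absent
--     if len(key) != 25:
--         return False
--     mask = 0
--     for ch in key.lower():
--         o = ord(ch) - ord('a')
--         if 0 <= o < 26:
--             mask |= 1 << o
--     return _popcount(mask) >= 25
-- ===== Notes on version B (the rewrite author's own statement) =====
-- stated objective: alternative
-- what changed: Instead of scanning the 26-letter alphabet and counting missing letters with an early exit, B makes one pass over the key itself, accumulating a 26-bit presence bitmask, and accepts iff the mask's popcount is at least 25.
import Mathlib
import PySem

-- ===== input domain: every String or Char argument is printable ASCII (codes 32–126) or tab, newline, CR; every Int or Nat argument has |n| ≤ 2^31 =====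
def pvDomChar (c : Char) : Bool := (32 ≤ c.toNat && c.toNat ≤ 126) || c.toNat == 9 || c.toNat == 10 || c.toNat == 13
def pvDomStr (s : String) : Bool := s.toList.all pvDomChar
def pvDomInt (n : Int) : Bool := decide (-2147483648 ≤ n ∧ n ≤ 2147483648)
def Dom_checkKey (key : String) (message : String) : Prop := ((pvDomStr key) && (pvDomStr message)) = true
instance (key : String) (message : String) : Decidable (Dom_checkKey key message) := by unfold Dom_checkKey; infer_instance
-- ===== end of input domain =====

-- B replaces A's scan of the 26-letter alphabet (membership test into the key,
-- running miss counter, early exit) by a single pass over the key building a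
-- 26-bit presence bitmask, accepted iff its popcount is ≥ 25 (objective: alternative).


-- ===== PORT A =====
-- ascii_lowercase
def pvAlphabet : List Char := "abcdefghijklmnopqrstuvwxyz".toList

-- the 'for letter in alphabet' loop with its numMissing counter and early return;
-- 'letter in key' is a single-char substring test, exactly char-list membership
def checkKeyLoop (key : List Char) : List Char → Int → Bool
  | [], _ => true
  | letter :: rest, numMissing =>
    if !key.contains letter then
      if numMissing + 1 > 1 then false else checkKeyLoop key rest (numMissing + 1)
    else checkKeyLoop key rest numMissing

def checkKey (key : String) (_message : String) : Bool :=
  if PySem.Str.len key ≠ 25 then false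
  else checkKeyLoop (PySem.Str.lower key).toList pvAlphabet 0

-- ===== PORT B =====
-- the body of B's 'for ch in key.lower()' loop: o = ord(ch) - ord('a'); set bit o if 0 <= o < 26
def pvMaskStep (mask : Nat) (ch : Char) : Nat :=
  let o : Int := (ch.toNat : Int) - 97
  if 0 ≤ o ∧ o < 26 then mask ||| (1 <<< o.toNat) else mask

-- B's helper _popcount: while n: c += n & 1; n >>= 1
def pvPopcountLoop (n c : Nat) : Nat :=
  if n = 0 then c else pvPopcountLoop (n >>> 1) (c + (n &&& 1))
termination_by n
decreasing_by simpa [Nat.shiftRight_one] using Nat.div_lt_self (Nat.pos_of_ne_zero (by assumption)) (by norm_num)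

def checkKey_alt (key : String) (_message : String) : Bool :=
  if PySem.Str.len key ≠ 25 then false
  else
    let mask := (PySem.Str.lower key).toList.foldl pvMaskStep 0
    decide (pvPopcountLoop mask 0 ≥ 25)

-- ===== PRECONDITION & SPEC =====
def Spec_checkKey (key : String) (message : String) (out : Bool) : Prop := out = checkKey_alt key message
instance (key : String) (message : String) (out : Bool) : Decidable (Spec_checkKey key message out) := by unfold Spec_checkKey; infer_instance

-- ===== CLAIM (what is proved, stated in full; the proofs are below) =====
def Claim_equal_checkKey : Prop := ∀ (key : String) (message : String), Dom_checkKey key message → Spec_checkKey key message (checkKey key message)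

-- ===== LEMMAS AND PROOFS =====

-- A's loop invariant: it returns whether numMissing plus the number of still-missing letters stays ≤ 1
theorem checkKeyLoop_eq (key : List Char) (letters : List Char) :
    ∀ n : Int, 0 ≤ n → n ≤ 1 →
    checkKeyLoop key letters n
      = decide (n + ((letters.filter (fun c => !key.contains c)).length : Int) ≤ 1) := by
  induction letters with
  | nil => intro n hn hn1; simpa [checkKeyLoop] using hn1
  | cons letter rest ih =>
    intro n hn hn1
    cases h : key.contains letter with
    | true =>
      have hm : letter ∈ key := by simpa using h
      simp [checkKeyLoop, hm, ih n hn hn1]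
    | false =>
      have hm : letter ∉ key := by simpa using h
      by_cases hlt : n + 1 > 1
      · have hbig : ¬ (n + 1 + ((rest.filter (fun c => !decide (c ∈ key))).length : Int) ≤ 1) := by
          have : (0:Int) ≤ ((rest.filter (fun c => !decide (c ∈ key))).length : Int) :=
            Int.natCast_nonneg _
          omega
        simp [checkKeyLoop, hm, hlt]
        omega
      · have hrec := ih (n + 1) (by omega) (by omega)
        simp only [checkKeyLoop, h, Bool.not_false, if_true, if_neg hlt, hrec,
          List.filter_cons, List.length_cons]
        simp
        omega

-- whether char c sets bit i of the mask
def pvHit (c : Char) (i : Nat) : Bool := decide (c.toNat = 97 + i ∧ i < 26)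

theorem pvMaskStep_testBit (acc : Nat) (c : Char) (i : Nat) :
    (pvMaskStep acc c).testBit i = (acc.testBit i || pvHit c i) := by
  unfold pvMaskStep pvHit
  by_cases h : 0 ≤ (c.toNat : Int) - 97 ∧ (c.toNat : Int) - 97 < 26
  · rw [if_pos h, Nat.testBit_or, Nat.one_shiftLeft, Nat.testBit_two_pow]
    have : (((c.toNat : Int) - 97).toNat = i) ↔ (c.toNat = 97 + i ∧ i < 26) := by omega
    simp [this]
  · rw [if_neg h]
    have : ¬ (c.toNat = 97 + i ∧ i < 26) := by omega
    simp [this]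

theorem pvMask_testBit (chars : List Char) : ∀ (acc : Nat) (i : Nat),
    (chars.foldl pvMaskStep acc).testBit i = (acc.testBit i || chars.any (fun c => pvHit c i)) := by
  induction chars with
  | nil => simp
  | cons c rest ih =>
    intro acc i
    simp only [List.foldl_cons, List.any_cons, ih, pvMaskStep_testBit, Bool.or_assoc]

theorem pvMask_lt (chars : List Char) : ∀ acc : Nat, acc < 2 ^ 26 →
    chars.foldl pvMaskStep acc < 2 ^ 26 := by
  induction chars with
  | nil => intro acc h; simpa using h
  | cons c rest ih =>
    intro acc h
    refine ih _ ?_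
    unfold pvMaskStep
    by_cases hc : 0 ≤ (c.toNat : Int) - 97 ∧ (c.toNat : Int) - 97 < 26
    · rw [if_pos hc]
      refine Nat.or_lt_two_pow h ?_
      rw [Nat.one_shiftLeft]
      exact Nat.pow_lt_pow_right (by norm_num) (by omega)
    · rw [if_neg hc]; exact h

-- B's while loop counts the set bits of its argument (bounded below 2^k)
theorem pvPopcountLoop_eq : ∀ (k n c : Nat), n < 2 ^ k →
    pvPopcountLoop n c = c + (List.range k).countP n.testBit := by
  intro k
  induction k with
  | zero =>
    intro n c h
    interval_cases n
    simp [pvPopcountLoop]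
  | succ k ih =>
    intro n c h
    by_cases hn : n = 0
    · subst hn
      have h0 : (List.range (k+1)).countP (Nat.testBit 0) = 0 :=
        List.countP_eq_zero.2 (fun a _ h => by rw [Nat.zero_testBit] at h; exact absurd h (by simp))
      simp [pvPopcountLoop, h0]
    · rw [pvPopcountLoop, if_neg hn]
      have hdiv : n >>> 1 = n / 2 := Nat.shiftRight_one n
      have hlt : n / 2 < 2 ^ k := by omega
      rw [hdiv, ih (n / 2) _ hlt]
      have hsplit : (List.range (k+1)).countP n.testBit
          = (if n.testBit 0 then 1 else 0) + (List.range k).countP (n / 2).testBit := by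
        rw [List.range_succ_eq_map]
        simp only [List.countP_cons, List.countP_map]
        have : (n.testBit ∘ Nat.succ) = (n / 2).testBit := by
          funext i; exact Nat.testBit_add_one n i
        rw [this]
        cases hb : n.testBit 0 <;> simp [Nat.add_comm]
      rw [hsplit, Nat.and_one_is_mod, Nat.testBit_zero]
      rcases Nat.mod_two_eq_zero_or_one n with h2 | h2 <;> (simp [h2]; try omega)

-- bits set in the mask ↔ alphabet letters present in the key
theorem pvMask_count (chars : List Char) :
    (List.range 26).countP ((chars.foldl pvMaskStep 0).testBit)
      = pvAlphabet.countP (fun c => decide (c ∈ chars)) := by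
  have halpha : pvAlphabet = (List.range 26).map (fun i => Char.ofNat (97 + i)) := by decide
  rw [halpha, List.countP_map]
  apply List.countP_congr
  intro i hi
  have hi26 : i < 26 := by simpa using hi
  have hv : (Char.ofNat (97 + i)).toNat = 97 + i := by
    have hval : (97 + i).isValidChar := Or.inl (by omega)
    simp [Char.ofNat, hval, Char.ofNatAux, Char.toNat]
    omega
  have hiff : ∀ c : Char, (Char.ofNat (97 + i) = c) ↔ c.toNat = 97 + i := by
    intro c
    constructor
    · rintro rfl; exact hv
    · intro h
      apply Char.ext
      apply UInt32.toNat_inj.mp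
      show (Char.ofNat (97 + i)).toNat = c.toNat
      rw [hv, h]
  have hbody : (chars.any fun c => pvHit c i) = decide (Char.ofNat (97 + i) ∈ chars) := by
    rcases hc : decide (Char.ofNat (97 + i) ∈ chars) with _ | _
    · have hc' : Char.ofNat (97 + i) ∉ chars := by simpa using hc
      apply List.any_eq_false.2
      intro c hcmem
      unfold pvHit
      rw [decide_eq_true_iff]
      rintro ⟨hcn, -⟩
      exact hc' (((hiff c).mpr hcn) ▸ hcmem)
    · have hc' : Char.ofNat (97 + i) ∈ chars := by simpa using hc
      apply List.any_eq_true.2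
      exact ⟨_, hc', by unfold pvHit; simp [hv, hi26]⟩
  rw [pvMask_testBit]
  simp only [Nat.zero_testBit, Bool.false_or, Function.comp, hbody]

-- present + missing = 26
theorem pv_countP_not (l : List Char) (p : Char → Bool) :
    l.countP p + l.countP (fun c => !p c) = l.length := by
  induction l with
  | nil => simp
  | cons c rest ih => cases h : p c <;> simp [h] <;> omega


theorem checkKey_eq_alt (key : String) (message : String) :
    checkKey key message = checkKey_alt key message := by
  unfold checkKey checkKey_alt
  by_cases hlen : PySem.Str.len key ≠ 25
  · simp only [if_pos hlen]
  · simp only [if_neg hlen]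
    set chars := (PySem.Str.lower key).toList with hchars
    rw [checkKeyLoop_eq _ _ 0 le_rfl (by omega),
        pvPopcountLoop_eq 26 _ 0 (pvMask_lt chars 0 (by norm_num)), pvMask_count]
    have hsum := pv_countP_not pvAlphabet (fun c => decide (c ∈ chars))
    have hlenA : pvAlphabet.length = 26 := by decide
    rw [hlenA] at hsum
    have hfc : (pvAlphabet.filter (fun c => !chars.contains c)).length
        = pvAlphabet.countP (fun c => !decide (c ∈ chars)) := by
      rw [← List.countP_eq_length_filter]
      apply List.countP_congr
      intro c _
      simp [List.contains_eq_mem]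
    simp only [Int.zero_add, Nat.zero_add, hfc]
    by_cases hle : pvAlphabet.countP (fun c => !decide (c ∈ chars)) ≤ 1
    · have h25 : 25 ≤ pvAlphabet.countP (fun c => decide (c ∈ chars)) := by omega
      simp only [decide_eq_decide]
      constructor <;> intro <;> [omega; omega]
    · have h25 : ¬ 25 ≤ pvAlphabet.countP (fun c => decide (c ∈ chars)) := by omega
      simp only [decide_eq_decide]
      constructor <;> intro <;> omega

-- ===== VERDICT (by name: the statement is the Claim_ definition above) =====
theorem checkKey_spec : Claim_equal_checkKey := by
  intro key message _
  exact checkKey_eq_alt key message
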